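-- pv_equiv track=rewrite | github.com/pypi-data/pypi-mirror-93 | packages/lh-clean-tool/lh_clean_tool-0.1.0.tar.gz/lh_clean_tool-0.1.0/lh_clean_tool/universal_utils.py | is_tongyixinyong_valid
-- ===== SOURCE A (Python) =====
-- def is_tongyixinyong_valid(raw_code):
--     tongyixinyong_code = {
--         "0": 0,
--         "1": 1,
--         "2": 2,
--         "3": 3,
--         "4": 4,
--         "5": 5,
--         "6": 6,
--         "7": 7,
--         "8": 8,
--         "9": 9,
--         "A": 10,
--         "B": 11,
--         "C": 12,
--         "D": 13,
--         "E": 14,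
--         "F": 15,
--         "G": 16,
--         "H": 17,
--         "J": 18,
--         "K": 19,
--         "L": 20,
--         "M": 21,
--         "N": 22,
--         "P": 23,
--         "Q": 24,
--         "R": 25,
--         "T": 26,
--         "U": 27,
--         "W": 28,
--         "X": 29,
--         "Y": 30,
--     }
--     tongyixinyong_weight = {
--         1: 1,
--         2: 3,
--         3: 9,
--         4: 27,
--         5: 19,
--         6: 26,
--         7: 16,
--         8: 17,
--         9: 20,
--         10: 29,
--         11: 25,
--         12: 13,
--         13: 8,
--         14: 24,
--         15: 10,
--         16: 30,
--         17: 28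
--     }
--     try:
--         raw_code = raw_code.replace(" ", "").strip()
--         if len(raw_code) != 18:
--             return False
--         num = 31 - sum(
--             [tongyixinyong_weight[a[0] + 1] * tongyixinyong_code[a[1]] for a in enumerate(raw_code[:17])]) % 31
--         if num == 31:
--             num = 0
--         current_num = tongyixinyong_code[raw_code[17]]
--         if num == current_num:
--             return True
--         else:
--             return False
--     except Exception as e:
--         return False
-- ===== SOURCE B (Python) =====
-- def is_tongyixinyong_valid(raw_code):
--     # Horner evaluation mod 31 over the value alphabet (weights are 3^i mod 31),
--     # instead of a weight table and a weighted-sum comprehension.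
--     alphabet = "0123456789ABCDEFGHJKLMNPQRTUWXY"
--     s = raw_code.replace(" ", "").strip()
--     if len(s) != 18:
--         return False
--     acc = 0
--     for c in reversed(s[:17]):
--         v = alphabet.find(c)
--         if v < 0:
--             return False
--         acc = (acc * 3 + v) % 31
--     check = alphabet.find(s[17])
--     if check < 0:
--         return False
--     return (31 - acc) % 31 == check
-- ===== Notes on version B (the rewrite author's own statement) =====
-- stated objective: alternative
-- what changed: Replaces the 17-entry weight table and the weighted-sum comprehension by a single reverse Horner loop mod 31 (the weights are 3^i mod 31), and replaces the 31-entry code dict by an index lookup in the value alphabet string.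
import Mathlib
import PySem

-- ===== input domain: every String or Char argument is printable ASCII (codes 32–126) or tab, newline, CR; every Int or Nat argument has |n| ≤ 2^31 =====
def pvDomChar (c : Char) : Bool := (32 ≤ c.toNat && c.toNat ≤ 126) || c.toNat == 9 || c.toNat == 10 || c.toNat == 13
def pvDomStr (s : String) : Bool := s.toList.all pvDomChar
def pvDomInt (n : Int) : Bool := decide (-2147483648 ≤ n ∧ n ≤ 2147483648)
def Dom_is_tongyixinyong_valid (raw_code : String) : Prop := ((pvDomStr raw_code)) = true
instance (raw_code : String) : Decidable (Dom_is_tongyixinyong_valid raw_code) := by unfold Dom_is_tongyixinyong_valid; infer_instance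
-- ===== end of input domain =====

-- B replaces A's 17-entry weight table and weighted-sum comprehension with a reverse Horner
-- loop mod 31 (the weights are 3^i mod 31) and A's 31-entry code dict with an index lookup
-- in the value alphabet; same checksum decision (objective: alternative).

-- ===== PORT A =====
def tyxCode : PySem.Dict Char Int := PySem.Dict.ofList
  [('0', 0), ('1', 1), ('2', 2), ('3', 3), ('4', 4), ('5', 5), ('6', 6), ('7', 7),
   ('8', 8), ('9', 9), ('A', 10), ('B', 11), ('C', 12), ('D', 13), ('E', 14), ('F', 15),
   ('G', 16), ('H', 17), ('J', 18), ('K', 19), ('L', 20), ('M', 21), ('N', 22), ('P', 23),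
   ('Q', 24), ('R', 25), ('T', 26), ('U', 27), ('W', 28), ('X', 29), ('Y', 30)]

def tyxWeight : PySem.Dict Int Int := PySem.Dict.ofList
  [(1, 1), (2, 3), (3, 9), (4, 27), (5, 19), (6, 26), (7, 16), (8, 17), (9, 20),
   (10, 29), (11, 25), (12, 13), (13, 8), (14, 24), (15, 10), (16, 30), (17, 28)]

-- the list comprehension: a KeyError anywhere makes the whole thing (and A, via except) fail
def tyxTerms : List (Int × Char) → Option (List Int)
  | [] => some []
  | (i, c) :: rest =>
    match tyxWeight.get? (i + 1), tyxCode.get? c with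
    | some w, some v => (tyxTerms rest).map (fun ts => w * v :: ts)
    | _, _ => none

def is_tongyixinyong_valid (raw_code : String) : Bool :=
  let rc := PySem.Chars.strip (PySem.Chars.replace raw_code.toList [' '] [])
  if rc.length ≠ 18 then false
  else
    match tyxTerms (PySem.List.enumerate (PySem.List.slice rc none (some 17))) with
    | none => false  -- KeyError caught by `except`
    | some ts =>
      let num := 31 - PySem.Int.mod ts.sum 31
      let num := if num = 31 then 0 else num
      match PySem.List.pyGet? rc 17 with
      | none => false  -- unreachable (length is 18); IndexError would be caught anyway
      | some c17 =>
        match tyxCode.get? c17 with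
        | none => false  -- KeyError caught by `except`
        | some cur => num == cur

-- ===== PORT B =====
def pvAlphabet : List Char :=
  ['0', '1', '2', '3', '4', '5', '6', '7', '8', '9', 'A', 'B', 'C', 'D', 'E', 'F',
   'G', 'H', 'J', 'K', 'L', 'M', 'N', 'P', 'Q', 'R', 'T', 'U', 'W', 'X', 'Y']

def pvHorner : Int → List Char → Option Int
  | acc, [] => some acc
  | acc, c :: cs =>
    let v := PySem.Chars.find pvAlphabet [c]
    if v < 0 then none
    else pvHorner (PySem.Int.mod (acc * 3 + v) 31) cs

def is_tongyixinyong_valid_alt (raw_code : String) : Bool :=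
  let s := PySem.Chars.strip (PySem.Chars.replace raw_code.toList [' '] [])
  if s.length ≠ 18 then false
  else
    match pvHorner 0 (PySem.List.slice s none (some 17)).reverse with
    | none => false
    | some acc =>
      match PySem.List.pyGet? s 17 with
      | none => false  -- unreachable: length is 18
      | some c17 =>
        let check := PySem.Chars.find pvAlphabet [c17]
        if check < 0 then false
        else PySem.Int.mod (31 - acc) 31 == check

-- ===== PRECONDITION & SPEC =====
def Spec_is_tongyixinyong_valid (raw_code : String) (out : Bool) : Prop := out = is_tongyixinyong_valid_alt raw_code
instance (raw_code : String) (out : Bool) : Decidable (Spec_is_tongyixinyong_valid raw_code out) := by unfold Spec_is_tongyixinyong_valid; infer_instance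

-- ===== CLAIM (what is proved, stated in full; the proofs are below) =====
def Claim_equal_is_tongyixinyong_valid : Prop := ∀ (raw_code : String), Dom_is_tongyixinyong_valid raw_code → Spec_is_tongyixinyong_valid raw_code (is_tongyixinyong_valid raw_code)

-- ===== LEMMAS AND PROOFS =====

-- look up every char of the list in A's code dict; none iff any is missing
def lookAll : List Char → Option (List Int)
  | [] => some []
  | c :: cs =>
    match tyxCode.get? c with
    | none => none
    | some v => (lookAll cs).map (v :: ·)

-- Σ v_j * 3^j
def pvPoly : List Int → Int
  | [] => 0
  | v :: vs => v + 3 * pvPoly vs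

-- the term list A's comprehension builds, expressed on the looked-up values
def pvTermsOf : Nat → List Int → List Int
  | _, [] => []
  | i, v :: vs => ((3 : Int) ^ i % 31) * v :: pvTermsOf (i + 1) vs

lemma tyxWeight_get (n : Nat) (h : n < 17) :
    tyxWeight.get? ((n : Int) + 1) = some ((3 : Int) ^ n % 31) := by
  have H : ∀ m : Nat, m < 17 → tyxWeight.get? ((m : Int) + 1) = some ((3 : Int) ^ m % 31) := by decide
  exact H n h

-- B's alphabet scan agrees with A's code dict: missing key ↔ find = -1 …
lemma code_none (c : Char) (h : tyxCode.get? c = none) : PySem.Chars.find pvAlphabet [c] = -1 := by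
  rw [PySem.Chars.find_eq_neg_one_iff, List.singleton_infix_iff]
  rw [PySem.Dict.get?_eq_none_iff_not_mem_keys] at h
  rw [show tyxCode.keys = pvAlphabet from by decide] at h
  exact h

-- … and a present key's value is its (nonnegative) alphabet index
lemma code_some (c : Char) (v : Int) (h : tyxCode.get? c = some v) :
    0 ≤ v ∧ PySem.Chars.find pvAlphabet [c] = v := by
  rw [PySem.Dict.get?_eq_some_iff_mem_items _ _ _ (by decide)] at h
  fin_cases h <;> exact ⟨by decide, by decide⟩

-- A's comprehension = code lookups plus the weight terms (weights 3^i mod 31)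
lemma tyxTerms_enumerate (cs : List Char) (i : Nat) (h : i + cs.length ≤ 17) :
    tyxTerms (PySem.List.enumerate cs (i : Int)) = (lookAll cs).map (pvTermsOf i) := by
  induction cs generalizing i with
  | nil => simp [PySem.List.enumerate, tyxTerms, lookAll, pvTermsOf]
  | cons c cs ih =>
    rw [PySem.List.enumerate_cons]
    have hw := tyxWeight_get i (by simp at h; omega)
    have hcast : (i : Int) + 1 = ((i + 1 : Nat) : Int) := by push_cast; ring
    simp only [tyxTerms, hw, lookAll]
    cases hc : tyxCode.get? c with
    | none => simp
    | some v =>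
      rw [hcast, ih (i + 1) (by simp at h ⊢; omega)]
      cases hla : lookAll cs <;> simp [pvTermsOf]

-- A's weighted sum is the base-3 polynomial of the values, mod 31
lemma sum_pvTermsOf (vs : List Int) (i : Nat) :
    ((pvTermsOf i vs).sum) % 31 = ((3 : Int) ^ i * pvPoly vs) % 31 := by
  induction vs generalizing i with
  | nil => simp [pvTermsOf, pvPoly]
  | cons v vs ih =>
    simp only [pvTermsOf, pvPoly, List.sum_cons]
    have h1 : ((3 : Int) ^ i % 31) ≡ 3 ^ i [ZMOD 31] := Int.emod_emod_of_dvd _ dvd_rfl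
    have h2 : (pvTermsOf (i + 1) vs).sum ≡ 3 ^ (i + 1) * pvPoly vs [ZMOD 31] := ih (i + 1)
    have h3 : (3 : Int) ^ i * v + 3 ^ (i + 1) * pvPoly vs = 3 ^ i * (v + 3 * pvPoly vs) := by ring
    exact ((h1.mul_right v).add h2).trans (h3 ▸ Int.ModEq.refl _)

lemma pvHorner_append (l : List Char) (acc : Int) (c : Char) :
    pvHorner acc (l ++ [c]) =
      match pvHorner acc l with
      | none => none
      | some a =>
        if PySem.Chars.find pvAlphabet [c] < 0 then none
        else some (PySem.Int.mod (a * 3 + PySem.Chars.find pvAlphabet [c]) 31) := by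
  induction l generalizing acc with
  | nil => simp [pvHorner]
  | cons d l ih =>
    simp only [List.cons_append, pvHorner]
    split <;> simp [ih]

-- B's reverse Horner loop also computes the base-3 polynomial of the values, mod 31
lemma pvHorner_reverse (cs : List Char) (acc : Int) (h0 : 0 ≤ acc) (h1 : acc < 31) :
    pvHorner acc cs.reverse =
      (lookAll cs).map (fun vs => (acc * 3 ^ cs.length + pvPoly vs) % 31) := by
  induction cs with
  | nil => simp [pvHorner, lookAll, pvPoly, Int.emod_eq_of_lt h0 h1]
  | cons c cs ih =>
    rw [List.reverse_cons, pvHorner_append, ih]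
    simp only [lookAll]
    cases hc : tyxCode.get? c with
    | none =>
      cases hla : lookAll cs <;> simp [code_none c hc]
    | some v =>
      obtain ⟨hv0, hfind⟩ := code_some c v hc
      cases hla : lookAll cs with
      | none => simp
      | some vs =>
        simp only [Option.map_some, hfind, if_neg (by omega : ¬ v < 0)]
        congr 1
        rw [PySem.Int.mod_eq_emod_of_pos (by norm_num)]
        have h1 : ((acc * 3 ^ cs.length + pvPoly vs) % 31) ≡ (acc * 3 ^ cs.length + pvPoly vs) [ZMOD 31] :=
          Int.emod_emod_of_dvd _ dvd_rfl
        have h3 : (acc * 3 ^ cs.length + pvPoly vs) * 3 + v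
            = acc * 3 ^ (cs.length + 1) + pvPoly (v :: vs) := by simp [pvPoly]; ring
        exact ((h1.mul_right 3).add_right v).trans (h3 ▸ Int.ModEq.refl _)

lemma pvPorts_agree (raw_code : String) :
    is_tongyixinyong_valid raw_code = is_tongyixinyong_valid_alt raw_code := by
  unfold is_tongyixinyong_valid is_tongyixinyong_valid_alt
  dsimp only
  set s : List Char := PySem.Chars.strip (PySem.Chars.replace raw_code.toList [' '] []) with hs
  by_cases hlen : s.length = 18
  · rw [PySem.List.slice_to s (b := 17) (by norm_num)]
    rw [show ((17 : Int)).toNat = 17 from rfl]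
    have hcs : (s.take 17).length = 17 := by simp [hlen]
    rw [show PySem.List.enumerate (s.take 17) = PySem.List.enumerate (s.take 17) ((0 : Nat) : Int) from rfl]
    rw [tyxTerms_enumerate (s.take 17) 0 (by omega)]
    rw [pvHorner_reverse (s.take 17) 0 le_rfl (by norm_num)]
    have hget : PySem.List.pyGet? s 17 = some s[17] := by
      rw [show (17 : Int) = ((17 : Nat) : Int) from rfl, PySem.List.pyGet?_natCast]
      exact List.getElem?_eq_getElem (by omega)
    rw [hget]
    simp only [if_neg (by omega : ¬ s.length ≠ 18), hcs, zero_mul, zero_add]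
    cases hla : lookAll (s.take 17) with
    | none => simp
    | some vs =>
      simp only [Option.map_some]
      cases hc : tyxCode.get? s[17] with
      | none =>
        have := code_none _ hc
        simp [this]
      | some cur =>
        obtain ⟨hv0, hfind⟩ := code_some _ _ hc
        simp only [hfind, if_neg (by omega : ¬ cur < 0)]
        have hsum : PySem.Int.mod (pvTermsOf 0 vs).sum 31 = pvPoly vs % 31 := by
          rw [PySem.Int.mod_eq_emod_of_pos (by norm_num), sum_pvTermsOf vs 0]
          simp
        rw [hsum, PySem.Int.mod_eq_emod_of_pos (by norm_num)]
        have hH0 : 0 ≤ pvPoly vs % 31 := Int.emod_nonneg _ (by norm_num)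
        have hH1 : pvPoly vs % 31 < 31 := Int.emod_lt_of_pos _ (by norm_num)
        have heq : (if 31 - pvPoly vs % 31 = 31 then (0 : Int) else 31 - pvPoly vs % 31)
            = (31 - pvPoly vs % 31) % 31 := by split_ifs <;> omega
        rw [heq]
  · simp [if_pos hlen]

-- ===== VERDICT (by name: the statement is the Claim_ definition above) =====
theorem is_tongyixinyong_valid_spec : Claim_equal_is_tongyixinyong_valid := by
  intro raw_code _
  exact pvPorts_agree raw_code
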